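-- pv_equiv track=rewrite | github.com/yters/dawkins | isosceles.py | lzd
-- ===== SOURCE A (Python) =====
-- def lzd(sequence):
--     d = set()
--     w = ''
--     for c in sequence:
--         w += c
--         if not w in d:
--             d.add(w)
--             w = ''
--     return d
-- ===== SOURCE B (Python) =====
-- def lzd(sequence):
--     # Trie over phrase ids: each dictionary phrase is a trie node, reached by an
--     # incremental pointer; the phrase string is materialized once when it is cut.
--     children = {}            # (node id, char) -> child node id
--     next_id = 1              # 0 is the root (empty phrase)
--     node = 0
--     buf = []
--     phrases = []
--     for c in sequence:
--         buf.append(c)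
--         nxt = children.get((node, c))
--         if nxt is not None:
--             node = nxt
--         else:
--             children[(node, c)] = next_id
--             next_id += 1
--             phrases.append(''.join(buf))
--             buf = []
--             node = 0
--     return set(phrases)
-- ===== Notes on version B (the rewrite author's own statement) =====
-- stated objective: alternative
-- what changed: Replaces the grow-a-string-and-hash-it-each-step set lookup with an LZ78 trie walked by an incremental node pointer, materializing each phrase string once when it is cut.
import Mathlib
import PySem

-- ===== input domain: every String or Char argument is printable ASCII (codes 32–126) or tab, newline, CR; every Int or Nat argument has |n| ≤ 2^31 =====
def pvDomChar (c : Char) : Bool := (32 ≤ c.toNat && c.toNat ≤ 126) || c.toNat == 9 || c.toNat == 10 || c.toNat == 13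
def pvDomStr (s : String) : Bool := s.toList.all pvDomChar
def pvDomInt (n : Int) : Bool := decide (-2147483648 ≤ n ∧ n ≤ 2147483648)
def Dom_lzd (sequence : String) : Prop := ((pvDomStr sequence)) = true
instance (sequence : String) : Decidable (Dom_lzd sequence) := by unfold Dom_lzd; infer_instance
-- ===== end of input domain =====

-- B replaces A's grow-a-string set lookup by an LZ78 trie walked with an incremental node pointer (alternative algorithm; each phrase string is built once).


-- ===== PORT A =====
-- strings are ported on the List Char side (exact: Python str equality is char-list equality),
-- wrapped back with String.mk at the end; the loop body is the named helper lzdStep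
def lzdStep (st : PySem.Set (List Char) × List Char) (c : Char) :
    PySem.Set (List Char) × List Char :=
  let w := st.2 ++ [c]                                   -- w += c
  if w ∈ st.1 then (st.1, w)                             -- (implicit else: keep w)
  else (PySem.Set.add st.1 w, [])                        -- d.add(w); w = ''

def lzd (sequence : String) : List String :=
  ((sequence.toList.foldl lzdStep (PySem.Set.empty, [])).1).map String.mk

-- ===== PORT B =====
-- state: (children trie, next_id, node, buf, phrases); ''.join(buf) is String.mk at the end
def lzdAltStep
    (st : PySem.Dict (Int × Char) Int × Int × Int × List Char × List (List Char))
    (c : Char) :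
    PySem.Dict (Int × Char) Int × Int × Int × List Char × List (List Char) :=
  let buf := st.2.2.2.1 ++ [c]                           -- buf.append(c)
  match st.1.get? (st.2.2.1, c) with                     -- children.get((node, c))
  | some nxt => (st.1, st.2.1, nxt, buf, st.2.2.2.2)
  | none => (st.1.insert (st.2.2.1, c) st.2.1, st.2.1 + 1, 0, [], st.2.2.2.2 ++ [buf])

def lzd_alt (sequence : String) : List String :=
  let st := sequence.toList.foldl lzdAltStep (PySem.Dict.empty, 1, 0, [], [])
  (PySem.Set.ofList st.2.2.2.2).map String.mk

-- ===== PRECONDITION & SPEC =====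
def Spec_lzd (sequence : String) (out : List String) : Prop := out = lzd_alt sequence
instance (sequence : String) (out : List String) : Decidable (Spec_lzd sequence out) := by unfold Spec_lzd; infer_instance

-- ===== CLAIM (what is proved, stated in full; the proofs are below) =====
def Claim_equal_lzd : Prop := ∀ (sequence : String), Dom_lzd sequence → Spec_lzd sequence (lzd sequence)

-- ===== LEMMAS AND PROOFS =====

-- the node id B's trie assigns to a phrase (0 for the root / empty phrase,
-- 1 + position in the emitted-phrase list otherwise)
def idOf (ph : List (List Char)) (x : List Char) : Int :=
  if x = [] then 0 else (ph.idxOf x : Int) + 1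

-- coupling invariant between A's state (d, w) — with d = ph, w = buf substituted — and B's state
def LzInv (ch : PySem.Dict (Int × Char) Int) (nid node : Int) (w : List Char)
    (ph : List (List Char)) : Prop :=
  ph.Nodup ∧ [] ∉ ph ∧ (w = [] ∨ w ∈ ph) ∧ node = idOf ph w ∧ nid = (ph.length : Int) + 1 ∧
  (∀ p ∈ ph, ∀ q, q ≠ [] → q <+: p → q ≠ p → q ∈ ph) ∧
  (∀ x c, (x = [] ∨ x ∈ ph) →
     ch.get? (idOf ph x, c) = if x ++ [c] ∈ ph then some (idOf ph (x ++ [c])) else none) ∧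
  (∀ n c, (∀ x, (x = [] ∨ x ∈ ph) → n ≠ idOf ph x) → ch.get? (n, c) = none)

theorem idOf_le {ph : List (List Char)} {x : List Char} (hx : x = [] ∨ x ∈ ph) :
    idOf ph x ≤ (ph.length : Int) := by
  rcases hx with rfl | hx
  · simp [idOf]
  · unfold idOf
    have := List.idxOf_lt_length_of_mem hx
    split <;> omega

theorem idOf_inj {ph : List (List Char)} (hne : [] ∉ ph)
    {x y : List Char} (hx : x = [] ∨ x ∈ ph) (hy : y = [] ∨ y ∈ ph)
    (h : idOf ph x = idOf ph y) : x = y := by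
  unfold idOf at h
  rcases hx with rfl | hx
  · rcases hy with rfl | hy
    · rfl
    · rw [if_pos rfl, if_neg (by intro h0; subst h0; exact hne hy)] at h; omega
  · rcases hy with rfl | hy
    · rw [if_neg (by intro h0; subst h0; exact hne hx), if_pos rfl] at h; omega
    · rw [if_neg (by intro h0; subst h0; exact hne hx),
          if_neg (by intro h0; subst h0; exact hne hy)] at h
      have hxl := List.idxOf_lt_length_of_mem hx
      have hyl := List.idxOf_lt_length_of_mem hy
      have hid : ph.idxOf x = ph.idxOf y := by omega
      calc x = ph[ph.idxOf x] := (List.getElem_idxOf hxl).symm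
        _ = ph[ph.idxOf y] := by simp [hid]
        _ = y := List.getElem_idxOf hyl

theorem idOf_append {ph : List (List Char)} {p x : List Char}
    (hx : x = [] ∨ x ∈ ph) : idOf (ph ++ [p]) x = idOf ph x := by
  unfold idOf
  split
  · rfl
  · rcases hx with rfl | hx
    · simp_all
    · rw [List.idxOf_append_of_mem hx]

theorem idOf_append_self {ph : List (List Char)} {p : List Char}
    (hp : p ∉ ph) (hpne : p ≠ []) : idOf (ph ++ [p]) p = (ph.length : Int) + 1 := by
  unfold idOf
  rw [if_neg hpne, List.idxOf_append_of_notMem hp]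
  simp

theorem inv_step {ch : PySem.Dict (Int × Char) Int} {nid node : Int} {w : List Char}
    {ph : List (List Char)} (h : LzInv ch nid node w ph) (c : Char) :
    (w ++ [c] ∈ ph → LzInv ch nid (idOf ph (w ++ [c])) (w ++ [c]) ph) ∧
    (w ++ [c] ∉ ph →
      LzInv (ch.insert (node, c) nid) (nid + 1) 0 [] (ph ++ [w ++ [c]])) := by
  obtain ⟨hnd, hne, hw, hnode, hnid, hpc, hE1, hE2⟩ := h
  constructor
  · intro hmem
    exact ⟨hnd, hne, Or.inr hmem, rfl, hnid, hpc, hE1, hE2⟩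
  · intro hnotin
    have hpne : w ++ [c] ≠ [] := by simp
    have hle : idOf ph w ≤ (ph.length : Int) := idOf_le hw
    subst hnode hnid
    refine ⟨?_, ?_, Or.inl rfl, by simp [idOf], ?_, ?_, ?_, ?_⟩
    · rw [List.nodup_append]
      refine ⟨hnd, List.nodup_singleton _, ?_⟩
      intro a ha b hb
      simp only [List.mem_singleton] at hb
      subst hb
      exact fun h'' => hnotin (h'' ▸ ha)
    · simp only [List.mem_append, List.mem_singleton]
      rintro (h' | h')
      · exact hne h'
      · exact hpne h'.symm
    · simp only [List.length_append, List.length_singleton]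
      push_cast
      omega
    · -- prefix-closedness of the new phrase list
      intro p' hp' q hq hpre hqnep
      rcases List.mem_append.1 hp' with hp' | hp'
      · exact List.mem_append_left _ (hpc p' hp' q hq hpre hqnep)
      · have hp'eq : p' = w ++ [c] := by simpa using hp'
        subst hp'eq
        have hqw : q <+: w := by
          rcases List.prefix_concat_iff.1 hpre with h' | h'
          · exact absurd h' hqnep
          · exact h'
        by_cases hqweq : q = w
        · subst hqweq
          rcases hw with rfl | hw'
          · exact absurd rfl hq
          · exact List.mem_append_left _ hw'
        · rcases hw with rfl | hw'
          · exact absurd (List.prefix_nil.1 hqw) hq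
          · exact List.mem_append_left _ (hpc w hw' q hq hqw hqweq)
    · -- edge characterisation (E1) for the grown trie
      intro x c' hx'
      have hxcases : (x = [] ∨ x ∈ ph) ∨ x = w ++ [c] := by
        rcases hx' with rfl | hx'
        · exact Or.inl (Or.inl rfl)
        · rcases List.mem_append.1 hx' with h' | h'
          · exact Or.inl (Or.inr h')
          · exact Or.inr (by simpa using h')
      rcases hxcases with hxold | rfl
      · rw [idOf_append hxold]
        by_cases hkey : x = w ∧ c' = c
        · obtain ⟨rfl, rfl⟩ := hkey
          rw [PySem.Dict.get?_insert_self]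
          rw [if_pos (List.mem_append_right _ (by simp)), idOf_append_self hnotin hpne]
        · have hkne : ((idOf ph x, c') : Int × Char) ≠ (idOf ph w, c) := by
            intro hk
            exact hkey ⟨idOf_inj hne hxold hw (congrArg Prod.fst hk), congrArg Prod.snd hk⟩
          rw [PySem.Dict.get?_insert_of_ne _ _ hkne, hE1 x c' hxold]
          have hxc'ne : x ++ [c'] ≠ w ++ [c] := by
            intro heq
            rw [← List.concat_eq_append, ← List.concat_eq_append] at heq
            exact hkey ⟨(List.concat_inj.1 heq).1, (List.concat_inj.1 heq).2⟩
          by_cases hmem2 : x ++ [c'] ∈ ph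
          · rw [if_pos hmem2, if_pos (List.mem_append_left _ hmem2),
                idOf_append (Or.inr hmem2)]
          · have hcond : x ++ [c'] ∉ ph ++ [w ++ [c]] := by
              simp only [List.mem_append, List.mem_singleton]
              rintro (h' | h')
              · exact hmem2 h'
              · exact hxc'ne h'
            rw [if_neg hmem2, if_neg hcond]
      · -- x is the freshly inserted phrase w ++ [c]
        rw [idOf_append_self hnotin hpne]
        have hknew : (((ph.length : Int) + 1, c') : Int × Char) ≠ (idOf ph w, c) := by
          intro hk
          have h1 : (ph.length : Int) + 1 = idOf ph w := congrArg Prod.fst hk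
          omega
        rw [PySem.Dict.get?_insert_of_ne _ _ hknew]
        have hnone : ch.get? ((ph.length : Int) + 1, c') = none := by
          apply hE2
          intro y hy
          have := idOf_le hy
          omega
        have hcond : w ++ [c] ++ [c'] ∉ ph ++ [w ++ [c]] := by
          intro hh
          rcases List.mem_append.1 hh with hh | hh
          · exact hnotin (hpc _ hh (w ++ [c]) hpne (by simp) (by simp))
          · simp at hh
        rw [hnone, if_neg hcond]
    · -- off-trie keys stay absent (E2)
      intro n c' hfar
      have hwid : idOf (ph ++ [w ++ [c]]) w = idOf ph w := idOf_append hw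
      have hnw : n ≠ idOf ph w := by
        have hh := hfar w (by
          rcases hw with rfl | hw'
          · exact Or.inl rfl
          · exact Or.inr (List.mem_append_left _ hw'))
        rwa [hwid] at hh
      have hkne : ((n, c') : Int × Char) ≠ (idOf ph w, c) := by
        intro hk
        exact hnw (congrArg Prod.fst hk)
      rw [PySem.Dict.get?_insert_of_ne _ _ hkne]
      apply hE2
      intro y hy
      have hh := hfar y (by
        rcases hy with rfl | hy'
        · exact Or.inl rfl
        · exact Or.inr (List.mem_append_left _ hy'))
      rwa [idOf_append hy] at hh

theorem loop_eq (cs : List Char) :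
    ∀ ch nid node w ph, LzInv ch nid node w ph →
    (cs.foldl lzdStep (ph, w)).1 =
      (cs.foldl lzdAltStep (ch, nid, node, w, ph)).2.2.2.2 ∧
    ((cs.foldl lzdAltStep (ch, nid, node, w, ph)).2.2.2.2).Nodup := by
  induction cs with
  | nil => exact fun ch nid node w ph h => ⟨rfl, h.1⟩
  | cons c cs ih =>
    intro ch nid node w ph h
    have hget : ch.get? (node, c) =
        if w ++ [c] ∈ ph then some (idOf ph (w ++ [c])) else none := by
      rw [h.2.2.2.1]
      exact h.2.2.2.2.2.2.1 w c h.2.2.1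
    simp only [List.foldl_cons]
    by_cases hmem : w ++ [c] ∈ ph
    · have hA : lzdStep (ph, w) c = (ph, w ++ [c]) := by
        show (if w ++ [c] ∈ ph then _ else _) = _
        rw [if_pos hmem]
      have hB : lzdAltStep (ch, nid, node, w, ph) c =
          (ch, nid, idOf ph (w ++ [c]), w ++ [c], ph) := by
        unfold lzdAltStep
        rw [hget, if_pos hmem]
      rw [hA, hB]
      exact ih _ _ _ _ _ ((inv_step h c).1 hmem)
    · have hsetadd : PySem.Set.add ph (w ++ [c]) = ph ++ [w ++ [c]] := by
        simp [PySem.Set.add, PySem.Set.contains, hmem]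
      have hA : lzdStep (ph, w) c = (ph ++ [w ++ [c]], []) := by
        show (if w ++ [c] ∈ ph then _ else _) = _
        rw [if_neg hmem, hsetadd]
      have hB : lzdAltStep (ch, nid, node, w, ph) c =
          (ch.insert (node, c) nid, nid + 1, 0, [], ph ++ [w ++ [c]]) := by
        unfold lzdAltStep
        rw [hget, if_neg hmem]
      rw [hA, hB]
      exact ih _ _ _ _ _ ((inv_step h c).2 hmem)

theorem lzd_init_inv : LzInv PySem.Dict.empty 1 0 [] [] := by
  refine ⟨List.nodup_nil, by simp, Or.inl rfl, by simp [idOf], by simp, by simp, ?_, ?_⟩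
  · intro x c hx
    rcases hx with rfl | hx
    · simp [PySem.Dict.get?_empty]
    · simp at hx
  · intro n c _
    exact PySem.Dict.get?_empty _

-- ===== VERDICT (by name: the statement is the Claim_ definition above) =====
theorem lzd_spec : Claim_equal_lzd := by
  intro s _
  unfold Spec_lzd lzd lzd_alt
  obtain ⟨heq, hnodup⟩ :=
    loop_eq s.toList PySem.Dict.empty 1 0 [] [] lzd_init_inv
  simp only []
  rw [show (PySem.Set.empty : PySem.Set (List Char)) = [] from rfl]
  rw [heq, PySem.Set.ofList_eq_self_of_nodup _ hnodup]
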